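-- pv_equiv track=rewrite | github.com/yesl-kim/algorithm-python | excercies/4. 이분검색 (결정알고리즘)&그리디알고리즘/7. 창고정리/answer.py | solution
-- ===== SOURCE A (Python) =====
-- def solution(n, m):
--     l=len(n)-1
--     for _ in range(m):
--         n.sort()
--         n[0]+=1
--         n[l]-=1
--     n.sort()
--     return n[l]-n[0]
-- ===== SOURCE B (Python) =====
-- # B: instead of re-sorting the list every step, keeps a dict of value counts and
-- # the current min/max, updating them in O(1) per step (all activity is at the
-- # two ends). A sorts n in place; B does not mutate its argument -- the
-- # equivalence proved is about the return value.
--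
-- def solution(n, m):
--     if len(n) == 1:
--         return 0
--     cnt = {}
--     for v in n:
--         cnt[v] = cnt.get(v, 0) + 1
--     s = sorted(n)
--     lo, hi = s[0], s[-1]
--     r = m
--     while r > 0:
--         a, b = lo, hi
--         cnt[a] = cnt.get(a, 0) - 1
--         cnt[b] = cnt.get(b, 0) - 1
--         cnt[a + 1] = cnt.get(a + 1, 0) + 1
--         cnt[b - 1] = cnt.get(b - 1, 0) + 1
--         lo = min(b - 1, a if cnt[a] > 0 else a + 1)
--         hi = max(a + 1, b if cnt[b] > 0 else b - 1)
--         r -= 1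
--     return hi - lo
-- ===== Notes on version B (the rewrite author's own statement) =====
-- stated objective: faster
-- what changed: Instead of re-sorting the whole list and indexing its ends on every one of the m steps, B builds a dict of value counts once and tracks the current min and max, updating counts and min/max in O(1) per step (all changes happen at the two ends of the sorted order).
-- outside the precondition, e.g. on solution([], 3): A raises IndexError, B raises IndexError
import Mathlib
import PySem

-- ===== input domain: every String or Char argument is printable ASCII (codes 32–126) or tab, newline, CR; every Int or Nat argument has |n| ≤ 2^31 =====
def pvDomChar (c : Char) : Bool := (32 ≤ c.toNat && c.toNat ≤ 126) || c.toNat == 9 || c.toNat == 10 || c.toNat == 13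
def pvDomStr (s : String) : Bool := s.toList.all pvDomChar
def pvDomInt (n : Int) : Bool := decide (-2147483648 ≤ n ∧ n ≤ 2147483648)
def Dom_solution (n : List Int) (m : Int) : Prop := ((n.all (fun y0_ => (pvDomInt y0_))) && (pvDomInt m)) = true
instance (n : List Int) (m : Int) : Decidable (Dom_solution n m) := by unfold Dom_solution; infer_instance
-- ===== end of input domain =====

-- B replaces A's per-step full sort by a dict of value counts with tracked
-- min/max, updated in O(1) per step; A sorts n in place (B does not mutate its
-- argument) — the equivalence proved is about the return value.

-- ===== PORT A =====
def solution (n : List Int) (m : Int) : Int :=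
  let l : Int := (n.length : Int) - 1
  let n := (PySem.List.pyRange 0 m 1).foldl (fun n _ =>
      let n := PySem.List.sorted n (fun x => x) false
      let n := PySem.List.pySetD n 0 (PySem.List.pyGetD n 0 0 + 1)
      let n := PySem.List.pySetD n l (PySem.List.pyGetD n l 0 - 1)
      n) n
  let n := PySem.List.sorted n (fun x => x) false
  PySem.List.pyGetD n l 0 - PySem.List.pyGetD n 0 0

-- ===== PORT B =====
-- the while-loop of B: r = steps remaining, cnt = value counts, lo/hi = current min/max
def loopC : Nat → PySem.Dict Int Int → Int → Int → Int × Int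
  | 0, _, lo, hi => (lo, hi)
  | r + 1, cnt, lo, hi =>
      let a := lo
      let b := hi
      let cnt := cnt.insert a (cnt.getD a 0 - 1)
      let cnt := cnt.insert b (cnt.getD b 0 - 1)
      let cnt := cnt.insert (a + 1) (cnt.getD (a + 1) 0 + 1)
      let cnt := cnt.insert (b - 1) (cnt.getD (b - 1) 0 + 1)
      loopC r cnt (min (b - 1) (if cnt.getD a 0 > 0 then a else a + 1))
                  (max (a + 1) (if cnt.getD b 0 > 0 then b else b - 1))

def solution_alt (n : List Int) (m : Int) : Int :=
  if n.length = 1 then 0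
  else
    let cnt := n.foldl (fun d v => d.insert v (d.getD v 0 + 1)) PySem.Dict.empty
    let s := PySem.List.sorted n (fun x => x) false
    let p := loopC m.toNat cnt (PySem.List.pyGetD s 0 0) (PySem.List.pyGetD s (-1) 0)
    p.2 - p.1

-- ===== PRECONDITION & SPEC =====
-- Pre_ excludes only the empty list, on which A raises IndexError (n[0] on []).
def Pre_solution (n : List Int) (m : Int) : Prop := n ≠ []
instance (n : List Int) (m : Int) : Decidable (Pre_solution n m) := by unfold Pre_solution; infer_instance
def pvWitness_solution : List Int × Int := ([3, 1, 7], 2)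

def Spec_solution (n : List Int) (m : Int) (out : Int) : Prop := out = solution_alt n m
instance (n : List Int) (m : Int) (out : Int) : Decidable (Spec_solution n m out) := by unfold Spec_solution; infer_instance

-- ===== CLAIM (what is proved, stated in full; the proofs are below) =====
def Claim_equal_solution : Prop := ∀ (n : List Int) (m : Int), Dom_solution n m → Pre_solution n m → Spec_solution n m (solution n m)

-- ===== LEMMAS AND PROOFS =====

-- A's loop body, as a function of the current list (l fixed from the initial length)
def bodyA (l : Int) (t : List Int) : List Int :=
  let s := PySem.List.sorted t (fun x => x) false
  let s := PySem.List.pySetD s 0 (PySem.List.pyGetD s 0 0 + 1)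
  PySem.List.pySetD s l (PySem.List.pyGetD s l 0 - 1)

-- the abstract one-step transformation: drop the ends, re-insert min+1 and max−1 in order
def insB (xs : List Int) (v : Int) : List Int :=
  match xs with
  | [] => [v]
  | x :: t => if v ≤ x then v :: x :: t else x :: insB t v

def stepB (s : List Int) : List Int :=
  insB (insB (PySem.List.slice s (some 1) (some (-1))) (PySem.List.pyGetD s 0 0 + 1))
       (PySem.List.pyGetD s (-1) 0 - 1)

theorem foldl_const_iterate (f : List Int → List Int) :
    ∀ (ls : List Int) (t : List Int), ls.foldl (fun acc _ => f acc) t = f^[ls.length] t := by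
  intro ls
  induction ls with
  | nil => intro t; rfl
  | cons x xs ih =>
      intro t
      simp [List.foldl_cons, ih, Function.iterate_succ_apply]

theorem insB_perm (v : Int) : ∀ xs : List Int, (insB xs v).Perm (v :: xs) := by
  intro xs
  induction xs with
  | nil => simp [insB]
  | cons x t ih =>
      simp only [insB]
      split
      · exact List.Perm.refl _
      · exact (ih.cons x).trans (List.Perm.swap v x t)

theorem insB_pairwise (v : Int) :
    ∀ xs : List Int, xs.Pairwise (· ≤ ·) → (insB xs v).Pairwise (· ≤ ·) := by
  intro xs
  induction xs with
  | nil => intro _; simp [insB]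
  | cons x t ih =>
      intro hp
      rw [List.pairwise_cons] at hp
      simp only [insB]
      split
      · rename_i hvx
        refine List.pairwise_cons.2 ⟨?_, List.pairwise_cons.2 hp⟩
        intro y hy
        rcases List.mem_cons.1 hy with rfl | hy
        · exact hvx
        · exact le_trans hvx (hp.1 y hy)
      · rename_i hvx
        refine List.pairwise_cons.2 ⟨?_, ih hp.2⟩
        intro y hy
        have := (insB_perm v t).mem_iff.1 hy
        rcases List.mem_cons.1 this with rfl | hy'
        · omega
        · exact hp.1 y hy'

theorem slice_one_neg_one (a b : Int) (mid : List Int) :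
    PySem.List.slice (a :: mid ++ [b]) (some 1) (some (-1)) = mid := by
  simp [PySem.List.slice]

-- decompose a list of length ≥ 2
theorem exists_decomp (s : List Int) (h : 2 ≤ s.length) :
    ∃ a mid b, s = a :: mid ++ [b] := by
  cases s with
  | nil => simp at h
  | cons a t =>
      rcases List.eq_nil_or_concat t with rfl | ⟨mid, b, rfl⟩
      · simp at h
      · exact ⟨a, mid, b, by simp⟩

theorem mid_pairwise (a b : Int) (mid : List Int)
    (hp : (a :: mid ++ [b]).Pairwise (· ≤ ·)) : mid.Pairwise (· ≤ ·) := by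
  have hsub : mid.Sublist (a :: mid ++ [b]) := by
    refine List.Sublist.trans ?_ (List.sublist_cons_self a (mid ++ [b]))
    exact List.sublist_append_left mid [b]
  exact hp.sublist hsub

-- bounds of a sorted decomposition
theorem decomp_bounds (a b : Int) (mid : List Int)
    (hp : (a :: mid ++ [b]).Pairwise (· ≤ ·)) :
    a ≤ b ∧ (∀ y ∈ mid, a ≤ y) ∧ (∀ y ∈ mid, y ≤ b) := by
  rw [List.pairwise_append] at hp
  obtain ⟨h1, _, h3⟩ := hp
  rw [List.pairwise_cons] at h1
  exact ⟨h3 a (by simp) b (by simp), fun y hy => h1.1 y hy, fun y hy => h3 y (by simp [hy]) b (by simp)⟩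

-- stepB on an explicit decomposition
theorem stepB_decomp (a b : Int) (mid : List Int) :
    stepB (a :: mid ++ [b]) = insB (insB mid (a + 1)) (b - 1) := by
  unfold stepB
  rw [slice_one_neg_one]
  have h0 : PySem.List.pyGetD (a :: mid ++ [b]) 0 0 = a := PySem.List.pyGetD_zero_cons _ _ _
  have h1 : PySem.List.pyGetD (a :: mid ++ [b]) (-1) 0 = b := by
    have : a :: mid ++ [b] = (a :: mid) ++ [b] := by simp
    rw [this, PySem.List.pyGetD_neg_one_append_singleton]
  rw [h0, h1]

theorem stepB_perm (a b : Int) (mid : List Int) :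
    (stepB (a :: mid ++ [b])).Perm ((b - 1) :: (a + 1) :: mid) := by
  rw [stepB_decomp]
  exact (insB_perm _ _).trans ((insB_perm _ _).cons _)

theorem stepB_length (a b : Int) (mid : List Int) :
    (stepB (a :: mid ++ [b])).length = mid.length + 2 := by
  have := (stepB_perm a b mid).length_eq
  simpa using this

theorem stepB_pairwise (a b : Int) (mid : List Int)
    (h : mid.Pairwise (· ≤ ·)) : (stepB (a :: mid ++ [b])).Pairwise (· ≤ ·) := by
  rw [stepB_decomp]
  exact insB_pairwise _ _ (insB_pairwise _ _ h)

-- sorted (bodyA (len−1) s) = stepB s for a sorted s of length ≥ 2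
theorem sorted_bodyA (s : List Int) (hp : s.Pairwise (· ≤ ·)) (h2 : 2 ≤ s.length) :
    PySem.List.sorted (bodyA ((s.length : Int) - 1) s) (fun x => x) false = stepB s := by
  obtain ⟨a, mid, b, rfl⟩ := exists_decomp s h2
  have hsort : PySem.List.sorted (a :: mid ++ [b]) (fun x => x) false = a :: mid ++ [b] :=
    PySem.List.sorted_eq_self_of_pairwise _ _ hp
  have hbody : bodyA (((a :: mid ++ [b]).length : Int) - 1) (a :: mid ++ [b])
      = (a + 1) :: mid ++ [b - 1] := by
    unfold bodyA
    rw [hsort]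
    simp
    rw [show ((mid.length : Int) + 1) = ((mid.length + 1 : Nat) : Int) from by push_cast; ring]
    simp only [PySem.List.pySetD_natCast, PySem.List.pyGetD_natCast]
    simp [PySem.List.pySetD_of_nonneg]
  rw [hbody, stepB_decomp]
  exact PySem.List.sorted_id_eq_of_perm_of_pairwise _ _
    (((insB_perm _ _).trans ((insB_perm _ _).cons _)).trans
      (List.perm_append_singleton (b - 1) ((a + 1) :: mid)).symm)
    (insB_pairwise _ _ (insB_pairwise _ _ (mid_pairwise a b mid hp)))

theorem length_bodyA (l : Int) (t : List Int) : (bodyA l t).length = t.length := by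
  unfold bodyA
  simp [PySem.List.length_pySetD, PySem.List.length_sorted]

theorem bodyA_sorted_arg (l : Int) (t : List Int) :
    bodyA l (PySem.List.sorted t (fun x => x) false) = bodyA l t := by
  unfold bodyA
  rw [PySem.List.sorted_sorted]

theorem length_iterate_bodyA (l : Int) : ∀ (k : Nat) (t : List Int),
    ((bodyA l)^[k] t).length = t.length := by
  intro k
  induction k with
  | zero => intro t; rfl
  | succ k ih => intro t; rw [Function.iterate_succ_apply, ih, length_bodyA]

theorem sorted_iterate (L : Nat) (hL : 2 ≤ L) :
    ∀ (k : Nat) (t : List Int), t.length = L →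
    PySem.List.sorted ((bodyA ((L : Int) - 1))^[k] t) (fun x => x) false
      = stepB^[k] (PySem.List.sorted t (fun x => x) false) := by
  intro k
  induction k with
  | zero => intro t ht; rfl
  | succ k ih =>
      intro t ht
      rw [Function.iterate_succ_apply, ih _ (by rw [length_bodyA, ht]),
          Function.iterate_succ_apply]
      congr 1
      rw [← bodyA_sorted_arg]
      have hlen : (PySem.List.sorted t (fun x => x) false).length = L := by
        rw [PySem.List.length_sorted, ht]
      have h := sorted_bodyA (PySem.List.sorted t (fun x => x) false)
        (PySem.List.sorted_pairwise _ _) (by omega)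
      rw [hlen] at h
      exact h

-- the head of a sorted list is any lower-bound member (and dually for the last)
theorem headD_sorted_char (s : List Int) (hpw : s.Pairwise (· ≤ ·)) (hne : s ≠ [])
    (x : Int) (hmem : x ∈ s) (hlb : ∀ y ∈ s, x ≤ y) : s.headD 0 = x := by
  cases s with
  | nil => exact absurd rfl hne
  | cons h t =>
      have h1 : x ≤ h := hlb h (by simp)
      have h2 : h ≤ x := by
        rcases List.mem_cons.1 hmem with rfl | hx
        · exact le_refl _
        · exact (List.pairwise_cons.1 hpw).1 x hx
      simp [le_antisymm h2 h1]

theorem getLastD_sorted_char (s : List Int) (hpw : s.Pairwise (· ≤ ·)) (hne : s ≠ [])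
    (x : Int) (hmem : x ∈ s) (hub : ∀ y ∈ s, y ≤ x) : s.getLastD 0 = x := by
  rcases List.eq_nil_or_concat s with rfl | ⟨init, z, rfl⟩
  · exact absurd rfl hne
  · rw [List.concat_eq_append] at hpw hmem hub ⊢
    rw [List.getLastD_concat]
    have h1 : z ≤ x := hub z (by simp)
    have h2 : x ≤ z := by
      rcases List.mem_append.1 hmem with hx | hx
      · exact (List.pairwise_append.1 hpw).2.2 x hx z (by simp)
      · simp at hx
        omega
    omega

-- count of stepB, pointwise (as integers)
theorem stepB_count (a b : Int) (mid : List Int) (v : Int) :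
    ((stepB (a :: mid ++ [b])).count v : Int)
      = ((a :: mid ++ [b]).count v : Int)
        - (if v = a then 1 else 0) - (if v = b then 1 else 0)
        + (if v = a + 1 then 1 else 0) + (if v = b - 1 then 1 else 0) := by
  rw [(stepB_perm a b mid).count_eq]
  simp only [List.count_cons, List.count_append, List.count_nil, List.count_singleton,
    beq_iff_eq]
  push_cast
  split_ifs <;> omega

-- the new minimum after one step
theorem stepB_headD (a b : Int) (mid : List Int)
    (hpw : (a :: mid ++ [b]).Pairwise (· ≤ ·)) :
    (stepB (a :: mid ++ [b])).headD 0
      = min (b - 1) (if 0 < (stepB (a :: mid ++ [b])).count a then a else a + 1) := by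
  obtain ⟨hab, hamid, hmidb⟩ := decomp_bounds a b mid hpw
  have hperm := stepB_perm a b mid
  have hpw' := stepB_pairwise a b mid (mid_pairwise a b mid hpw)
  have hne : stepB (a :: mid ++ [b]) ≠ [] := by
    have := stepB_length a b mid
    intro h
    rw [h] at this
    simp at this
  by_cases hca : 0 < (stepB (a :: mid ++ [b])).count a
  · have haM : a ∈ stepB (a :: mid ++ [b]) := List.count_pos_iff.1 hca
    rw [if_pos hca]
    apply headD_sorted_char _ hpw' hne
    · rcases le_total (b - 1) a with h | h
      · rw [min_eq_left h]
        exact hperm.mem_iff.2 (by simp)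
      · rw [min_eq_right h]
        exact haM
    · intro y hy
      rcases List.mem_cons.1 (hperm.mem_iff.1 hy) with rfl | hy'
      · exact min_le_left _ _
      rcases List.mem_cons.1 hy' with rfl | hy''
      · have := min_le_right (b - 1) a
        omega
      · have := hamid y hy''
        have := min_le_right (b - 1) a
        omega
  · have haM : a ∉ stepB (a :: mid ++ [b]) := by
      intro h
      exact hca (List.count_pos_iff.2 h)
    rw [if_neg hca]
    apply headD_sorted_char _ hpw' hne
    · rcases le_total (b - 1) (a + 1) with h | h
      · rw [min_eq_left h]
        exact hperm.mem_iff.2 (by simp)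
      · rw [min_eq_right h]
        exact hperm.mem_iff.2 (by simp)
    · intro y hy
      rcases List.mem_cons.1 (hperm.mem_iff.1 hy) with rfl | hy'
      · exact min_le_left _ _
      rcases List.mem_cons.1 hy' with rfl | hy''
      · exact min_le_right _ _
      · have h1 := hamid y hy''
        have h2 : y ≠ a := fun h =>
          haM (hperm.mem_iff.2 (List.mem_cons.2 (Or.inr (List.mem_cons.2 (Or.inr (h ▸ hy''))))))
        have := min_le_right (b - 1) (a + 1)
        omega

-- the new maximum after one step
theorem stepB_getLastD (a b : Int) (mid : List Int)
    (hpw : (a :: mid ++ [b]).Pairwise (· ≤ ·)) :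
    (stepB (a :: mid ++ [b])).getLastD 0
      = max (a + 1) (if 0 < (stepB (a :: mid ++ [b])).count b then b else b - 1) := by
  obtain ⟨hab, hamid, hmidb⟩ := decomp_bounds a b mid hpw
  have hperm := stepB_perm a b mid
  have hpw' := stepB_pairwise a b mid (mid_pairwise a b mid hpw)
  have hne : stepB (a :: mid ++ [b]) ≠ [] := by
    have := stepB_length a b mid
    intro h
    rw [h] at this
    simp at this
  by_cases hcb : 0 < (stepB (a :: mid ++ [b])).count b
  · have hbM : b ∈ stepB (a :: mid ++ [b]) := List.count_pos_iff.1 hcb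
    rw [if_pos hcb]
    apply getLastD_sorted_char _ hpw' hne
    · rcases le_total (a + 1) b with h | h
      · rw [max_eq_right h]
        exact hbM
      · rw [max_eq_left h]
        exact hperm.mem_iff.2 (by simp)
    · intro y hy
      rcases List.mem_cons.1 (hperm.mem_iff.1 hy) with rfl | hy'
      · have := le_max_right (a + 1) b
        omega
      rcases List.mem_cons.1 hy' with rfl | hy''
      · exact le_max_left _ _
      · have := hmidb y hy''
        have := le_max_right (a + 1) b
        omega
  · have hbM : b ∉ stepB (a :: mid ++ [b]) := by
      intro h
      exact hcb (List.count_pos_iff.2 h)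
    rw [if_neg hcb]
    apply getLastD_sorted_char _ hpw' hne
    · rcases le_total (a + 1) (b - 1) with h | h
      · rw [max_eq_right h]
        exact hperm.mem_iff.2 (by simp)
      · rw [max_eq_left h]
        exact hperm.mem_iff.2 (by simp)
    · intro y hy
      rcases List.mem_cons.1 (hperm.mem_iff.1 hy) with rfl | hy'
      · exact le_max_right _ _
      rcases List.mem_cons.1 hy' with rfl | hy''
      · exact le_max_left _ _
      · have h1 := hmidb y hy''
        have h2 : y ≠ b := fun h =>
          hbM (hperm.mem_iff.2 (List.mem_cons.2 (Or.inr (List.mem_cons.2 (Or.inr (h ▸ hy''))))))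
        have := le_max_right (a + 1) (b - 1)
        omega

-- the four dict updates of one loop iteration, and the new min/max
def upd4 (cnt : PySem.Dict Int Int) (a b : Int) : PySem.Dict Int Int :=
  let cnt := cnt.insert a (cnt.getD a 0 - 1)
  let cnt := cnt.insert b (cnt.getD b 0 - 1)
  let cnt := cnt.insert (a + 1) (cnt.getD (a + 1) 0 + 1)
  cnt.insert (b - 1) (cnt.getD (b - 1) 0 + 1)

def newLo (cnt : PySem.Dict Int Int) (a b : Int) : Int :=
  min (b - 1) (if cnt.getD a 0 > 0 then a else a + 1)

def newHi (cnt : PySem.Dict Int Int) (a b : Int) : Int :=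
  max (a + 1) (if cnt.getD b 0 > 0 then b else b - 1)

theorem loopC_succ (r : Nat) (cnt : PySem.Dict Int Int) (lo hi : Int) :
    loopC (r + 1) cnt lo hi
      = loopC r (upd4 cnt lo hi) (newLo (upd4 cnt lo hi) lo hi) (newHi (upd4 cnt lo hi) lo hi) :=
  rfl

theorem getD_upd4 (cnt : PySem.Dict Int Int) (a b v : Int) :
    (upd4 cnt a b).getD v 0
      = cnt.getD v 0 - (if v = a then 1 else 0) - (if v = b then 1 else 0)
        + (if v = a + 1 then 1 else 0) + (if v = b - 1 then 1 else 0) := by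
  unfold upd4
  simp only [PySem.Dict.getD_insert]
  split_ifs <;> subst_vars <;> first | omega | (rename_i h; rw [h]; omega)

-- the counter loop follows the abstract iteration
theorem loopC_eq : ∀ (r : Nat) (Y : List Int) (cnt : PySem.Dict Int Int),
    Y.Pairwise (· ≤ ·) → 2 ≤ Y.length →
    (∀ v, cnt.getD v 0 = (Y.count v : Int)) →
    loopC r cnt (Y.headD 0) (Y.getLastD 0)
      = ((stepB^[r] Y).headD 0, (stepB^[r] Y).getLastD 0) := by
  intro r
  induction r with
  | zero => intro Y cnt _ _ _; rfl
  | succ r ih =>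
      intro Y cnt hpw hlen hcnt
      obtain ⟨a, mid, b, rfl⟩ := exists_decomp Y hlen
      have hhead : (a :: mid ++ [b]).headD 0 = a := rfl
      have hlast : (a :: mid ++ [b]).getLastD 0 = b := by
        rw [show a :: mid ++ [b] = (a :: mid) ++ [b] from rfl, List.getLastD_concat]
      rw [hhead, hlast, loopC_succ]
      have hc4 : ∀ v, (upd4 cnt a b).getD v 0 = ((stepB (a :: mid ++ [b])).count v : Int) := by
        intro v
        rw [getD_upd4, hcnt v, stepB_count]
      have hpw' := stepB_pairwise a b mid (mid_pairwise a b mid hpw)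
      have hlen' : 2 ≤ (stepB (a :: mid ++ [b])).length := by
        rw [stepB_length]
        omega
      have hlo : newLo (upd4 cnt a b) a b = (stepB (a :: mid ++ [b])).headD 0 := by
        unfold newLo
        rw [hc4 a, stepB_headD a b mid hpw]
        by_cases h : 0 < (stepB (a :: mid ++ [b])).count a
        · rw [if_pos (by exact_mod_cast h), if_pos h]
        · rw [if_neg (by exact_mod_cast h), if_neg h]
      have hhi : newHi (upd4 cnt a b) a b = (stepB (a :: mid ++ [b])).getLastD 0 := by
        unfold newHi
        rw [hc4 b, stepB_getLastD a b mid hpw]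
        by_cases h : 0 < (stepB (a :: mid ++ [b])).count b
        · rw [if_pos (by exact_mod_cast h), if_pos h]
        · rw [if_neg (by exact_mod_cast h), if_neg h]
      rw [hlo, hhi, ih (stepB (a :: mid ++ [b])) (upd4 cnt a b) hpw' hlen' hc4,
          Function.iterate_succ_apply]

-- pyGetD at the last position, on an explicit decomposition
theorem pyGetD_last (a b : Int) (mid : List Int) :
    PySem.List.pyGetD (a :: mid ++ [b]) ((mid.length + 1 : Nat) : Int) 0 = b := by
  rw [PySem.List.pyGetD_natCast, List.getD]
  rw [show a :: mid ++ [b] = (a :: mid) ++ [b] from by simp]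
  rw [show mid.length + 1 = ((a :: mid)).length from by simp]
  rw [List.getElem?_concat_length]
  rfl

-- A as "sort the iterate of bodyA, subtract ends"
theorem solution_eq_iterate (n : List Int) (m : Int) :
    solution n m =
      PySem.List.pyGetD
        (PySem.List.sorted ((bodyA ((n.length : Int) - 1))^[m.toNat] n) (fun x => x) false)
        ((n.length : Int) - 1) 0
      - PySem.List.pyGetD
        (PySem.List.sorted ((bodyA ((n.length : Int) - 1))^[m.toNat] n) (fun x => x) false)
        0 0 := by
  have h := foldl_const_iterate (bodyA ((n.length : Int) - 1)) (PySem.List.pyRange 0 m 1) n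
  unfold solution
  show PySem.List.pyGetD
        (PySem.List.sorted ((PySem.List.pyRange 0 m 1).foldl
          (fun t _ => bodyA ((n.length : Int) - 1) t) n) (fun x => x) false)
        ((n.length : Int) - 1) 0
      - PySem.List.pyGetD
        (PySem.List.sorted ((PySem.List.pyRange 0 m 1).foldl
          (fun t _ => bodyA ((n.length : Int) - 1) t) n) (fun x => x) false)
        0 0 = _
  rw [h, PySem.List.length_pyRange_one]
  norm_num

-- ===== VERDICT (by name: the statement is the Claim_ definition above) =====
theorem solution_spec : Claim_equal_solution := by
  unfold Claim_equal_solution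
  intro n m _ hpre
  unfold Spec_solution
  rw [solution_eq_iterate]
  unfold solution_alt
  have hnn : n.length ≠ 0 := by
    intro h
    exact hpre (List.length_eq_zero_iff.1 h)
  have hsl : (PySem.List.sorted n (fun x => x) false).length = n.length :=
    PySem.List.length_sorted _ _ _
  by_cases h2 : 2 ≤ n.length
  · -- length ≥ 2
    rw [if_neg (by omega)]
    show _ = (loopC m.toNat
        (n.foldl (fun d v => d.insert v (d.getD v 0 + 1)) PySem.Dict.empty)
        (PySem.List.pyGetD (PySem.List.sorted n (fun x => x) false) 0 0)
        (PySem.List.pyGetD (PySem.List.sorted n (fun x => x) false) (-1) 0)).2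
      - (loopC m.toNat
        (n.foldl (fun d v => d.insert v (d.getD v 0 + 1)) PySem.Dict.empty)
        (PySem.List.pyGetD (PySem.List.sorted n (fun x => x) false) 0 0)
        (PySem.List.pyGetD (PySem.List.sorted n (fun x => x) false) (-1) 0)).1
    rw [sorted_iterate n.length h2 m.toNat n rfl]
    -- the sorted start s0, decomposed
    obtain ⟨a0, mid0, b0, hd0⟩ := exists_decomp (PySem.List.sorted n (fun x => x) false) (by omega)
    have hlo : PySem.List.pyGetD (PySem.List.sorted n (fun x => x) false) 0 0
        = (PySem.List.sorted n (fun x => x) false).headD 0 := by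
      rw [hd0, List.cons_append, PySem.List.pyGetD_zero_cons]
      rfl
    have hhi : PySem.List.pyGetD (PySem.List.sorted n (fun x => x) false) (-1) 0
        = (PySem.List.sorted n (fun x => x) false).getLastD 0 := by
      rw [hd0, show a0 :: mid0 ++ [b0] = (a0 :: mid0) ++ [b0] from by simp,
          PySem.List.pyGetD_neg_one_append_singleton, List.getLastD_concat]
    have hcnt : ∀ v,
        (n.foldl (fun d v => d.insert v (d.getD v 0 + 1)) PySem.Dict.empty).getD v 0
          = ((PySem.List.sorted n (fun x => x) false).count v : Int) := by
      intro v
      rw [PySem.Dict.getD_foldl_insert_add_one, PySem.Dict.getD_empty,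
          ((PySem.List.sorted_perm n (fun x => x) false).count_eq v)]
      ring
    rw [hlo, hhi, loopC_eq m.toNat _ _ (PySem.List.sorted_pairwise _ _) (by omega) hcnt]
    -- decompose the final state
    have hpwk : (stepB^[m.toNat] (PySem.List.sorted n (fun x => x) false)).Pairwise (· ≤ ·) ∧
        (stepB^[m.toNat] (PySem.List.sorted n (fun x => x) false)).length = n.length := by
      induction m.toNat with
      | zero => exact ⟨PySem.List.sorted_pairwise _ _, hsl⟩
      | succ k ihk =>
          obtain ⟨hp, hl⟩ := ihk
          obtain ⟨a, mid, b, hd⟩ := exists_decomp _ (by omega : 2 ≤ (stepB^[k] (PySem.List.sorted n (fun x => x) false)).length)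
          have hmidlen : mid.length + 2 = n.length := by
            have := congrArg List.length hd
            simp at this
            omega
          refine ⟨?_, ?_⟩
          · rw [Function.iterate_succ_apply', hd]
            exact stepB_pairwise _ _ _ (mid_pairwise a b mid (hd ▸ hp))
          · rw [Function.iterate_succ_apply', hd, stepB_length]
            exact hmidlen
    obtain ⟨hpk, hlk⟩ := hpwk
    obtain ⟨a, mid, b, hd⟩ := exists_decomp _ (by omega : 2 ≤ (stepB^[m.toNat] (PySem.List.sorted n (fun x => x) false)).length)
    rw [hd]
    have hmidlen : mid.length + 2 = n.length := by
      have := congrArg List.length hd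
      simp at this
      omega
    have hcast : ((n.length : Int) - 1) = ((mid.length + 1 : Nat) : Int) := by
      push_cast
      omega
    rw [hcast, pyGetD_last]
    have hheadk : (a :: mid ++ [b]).headD 0 = a := rfl
    have hlastk : (a :: mid ++ [b]).getLastD 0 = b := by
      rw [show a :: mid ++ [b] = (a :: mid) ++ [b] from by simp, List.getLastD_concat]
    rw [hheadk, hlastk, List.cons_append, PySem.List.pyGetD_zero_cons]
  · -- length = 1
    have hL : n.length = 1 := by omega
    rw [if_pos hL]
    have hXlen : (PySem.List.sorted ((bodyA ((n.length : Int) - 1))^[m.toNat] n)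
        (fun x => x) false).length = 1 := by
      rw [PySem.List.length_sorted, length_iterate_bodyA, hL]
    obtain ⟨c, hc⟩ := List.length_eq_one_iff.1 hXlen
    rw [hc, hL]
    norm_num
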